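-- pv_equiv track=rewrite | github.com/thiagogq-dev/TCC_TESTE | run_depth_analyses.py | aggregate_tests_vs_no_tests
-- ===== SOURCE A (Python) =====
-- from collections import defaultdict
--
-- def aggregate_tests_vs_no_tests(data, fix_to_bic):
--     # count propagation where any commit in the path has tests vs none
--     propagation_with_tests = defaultdict(int)
--     propagation_without_tests = defaultdict(int)
--
--     has_tests_map = {rec.get("bug_causer"): (rec.get("has_tests") == "Yes") for rec in data}
--
--     def rec_count(commit, depth=1, visited=None, has_tests_in_path=False):
--         if visited is None:
--             visited = set()
--         if commit in visited:
--             return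
--         visited.add(commit)
--         if has_tests_map.get(commit, False):
--             has_tests_in_path = True
--         if has_tests_in_path:
--             propagation_with_tests[depth] += 1
--         else:
--             propagation_without_tests[depth] += 1
--         for bic in fix_to_bic.get(commit, []):
--             rec_count(bic, depth + 1, visited, has_tests_in_path)
--
--     for rec in data:
--         rec_count(rec.get("bug_causer"))
--
--     return propagation_with_tests, propagation_without_tests
-- ===== SOURCE B (Python) =====
-- from collections import Counter
--
-- def aggregate_tests_vs_no_tests(data, fix_to_bic):
--     # Stage 1: iterative DFS (explicit stack) producing a flat event trace;
--     # Stage 2: count the trace with two Counters.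
--     has_tests_map = {rec.get("bug_causer"): (rec.get("has_tests") == "Yes") for rec in data}
--
--     events = []
--     for rec in data:
--         visited = set()
--         stack = [(rec.get("bug_causer"), 1, False)]
--         while stack:
--             commit, depth, flag = stack.pop()
--             if commit in visited:
--                 continue
--             visited.add(commit)
--             flag = flag or has_tests_map.get(commit, False)
--             events.append((flag, depth))
--             for bic in reversed(fix_to_bic.get(commit, [])):
--                 stack.append((bic, depth + 1, flag))
--
--     with_tests = Counter(d for f, d in events if f)
--     without_tests = Counter(d for f, d in events if not f)
--     return with_tests, without_tests
-- ===== Notes on version B (the rewrite author's own statement) =====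
-- stated objective: alternative
-- what changed: A's recursive DFS that mutates two shared defaultdicts is replaced by a two-stage pipeline: an iterative explicit-stack DFS first emits a flat (flag, depth) event trace, and two Counters are then built from the filtered trace in a separate pass.
import Mathlib
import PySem

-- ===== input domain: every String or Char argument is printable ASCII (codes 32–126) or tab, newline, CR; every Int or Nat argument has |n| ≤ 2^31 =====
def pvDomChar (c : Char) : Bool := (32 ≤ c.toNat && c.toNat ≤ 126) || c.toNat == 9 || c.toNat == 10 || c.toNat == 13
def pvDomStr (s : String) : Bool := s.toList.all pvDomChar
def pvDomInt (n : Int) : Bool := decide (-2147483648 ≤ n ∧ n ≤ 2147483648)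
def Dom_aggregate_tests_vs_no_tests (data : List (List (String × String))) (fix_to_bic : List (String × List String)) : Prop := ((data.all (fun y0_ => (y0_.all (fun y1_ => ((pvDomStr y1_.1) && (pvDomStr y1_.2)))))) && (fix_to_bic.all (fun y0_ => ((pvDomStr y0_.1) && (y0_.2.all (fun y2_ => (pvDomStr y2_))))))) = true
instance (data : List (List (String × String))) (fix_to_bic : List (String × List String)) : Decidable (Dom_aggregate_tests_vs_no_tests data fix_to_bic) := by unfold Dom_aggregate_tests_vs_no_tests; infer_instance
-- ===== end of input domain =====

-- B replaces A's recursive DFS that mutates two shared count dicts by a two-stage pipeline: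
-- an iterative explicit-stack DFS first emits a flat (flag, depth) event trace, and the two
-- counters are then built from the filtered trace in a separate pass. Objective: alternative
-- decomposition, same asymptotic cost.

-- ===== PORT A =====
-- the threaded mutable state of A's rec_count: (visited, propagation_with_tests, propagation_without_tests)
abbrev pvStV := PySem.Set (Option String) × PySem.Dict Int Int × PySem.Dict Int Int

-- shared by both ports (both Pythons contain the identical has_tests_map comprehension and
-- the identical fix_to_bic.get(commit, []) lookup):
def pvHasTestsMap (data : List (List (String × String))) : PySem.Dict (Option String) Bool :=
  data.foldl
    (fun m r => m.insert ((PySem.Dict.mk r).get? "bug_causer")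
                         ((PySem.Dict.mk r).get? "has_tests" == some "Yes"))
    PySem.Dict.empty

-- fix_to_bic.get(commit, []) where commit : Option String (a missing "bug_causer" is None)
def pvGetBics (ftb : List (String × List String)) (c : Option String) : List String :=
  match c with
  | none => []
  | some s => (PySem.Dict.mk ftb).getD s []

-- A's rec_count, literally: check visited, mark, update flag, bump the bucket (defaultdict +=1 is
-- Dict.modify), recurse over the children in order.  The recursion is made total by a fuel that is
-- consumed once per call and threaded through (fst of the state pair); n is a structural bound on
-- the fuel, only there so Lean sees the recursion terminate.
def pvRecCount (htm : PySem.Dict (Option String) Bool) (ftb : List (String × List String)) :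
    Nat → Option String × Int × Bool → Nat × pvStV → Nat × pvStV
  | _, _, (0, st) => (0, st)
  | 0, _, (_+1, st) => (0, st)   -- unreachable while fuel ≤ n
  | n+1, (c, d, ht), (f+1, (vis, wt, wo)) =>
    if PySem.Set.contains vis c then (f, (vis, wt, wo))
    else
      let vis := PySem.Set.add vis c
      let ht := if htm.getD c false then true else ht
      let wt := if ht then wt.modify d 0 (· + 1) else wt
      let wo := if ht then wo else wo.modify d 0 (· + 1)
      (pvGetBics ftb c).foldl
        (fun p b => pvRecCount htm ftb n (some b, d + 1, ht) p) (f, (vis, wt, wo))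

def aggregate_tests_vs_no_tests (data : List (List (String × String))) (fix_to_bic : List (String × List String)) : (List (Int × Int)) × (List (Int × Int)) :=
  let htm := pvHasTestsMap data
  let fuel := 1 + data.length + (fix_to_bic.map (fun p => p.2.length)).sum
  let acc :=
    data.foldl
      (fun (acc : PySem.Dict Int Int × PySem.Dict Int Int) r =>
        let res := pvRecCount htm fix_to_bic fuel
                     ((PySem.Dict.mk r).get? "bug_causer", 1, false)
                     (fuel, (PySem.Set.empty, acc.1, acc.2))
        (res.2.2.1, res.2.2.2))
      (PySem.Dict.empty, PySem.Dict.empty)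
  (acc.1.items, acc.2.items)

-- ===== PORT B =====
-- the state of B's while loop: (visited, the global events list)
abbrev pvStE := PySem.Set (Option String) × List (Bool × Int)

-- B's while loop over the explicit stack, appending one (flag, depth) event per productive pop;
-- the stack is modeled head-is-top, so Python's "push reversed(children); pop last" is prepending
-- the children in their original order.  Fuel (one unit per pop) makes the loop total.
def pvLoopE (htm : PySem.Dict (Option String) Bool) (ftb : List (String × List String)) :
    Nat → List (Option String × Int × Bool) → pvStE → pvStE
  | _, [], st => st
  | 0, _, st => st
  | f+1, (c, d, ht) :: rest, (vis, evs) =>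
    if PySem.Set.contains vis c then pvLoopE htm ftb f rest (vis, evs)
    else
      let vis := PySem.Set.add vis c
      let ht := ht || htm.getD c false
      pvLoopE htm ftb f
        (((pvGetBics ftb c).map (fun b => (some b, d + 1, ht))) ++ rest)
        (vis, evs ++ [(ht, d)])

-- Counter(generator): fold the depths into a dict, first occurrence fixes the key's position
def pvCounter (m : PySem.Dict Int Int) (ds : List Int) : PySem.Dict Int Int :=
  ds.foldl (fun m d => m.modify d 0 (· + 1)) m

def aggregate_tests_vs_no_tests_alt (data : List (List (String × String))) (fix_to_bic : List (String × List String)) : (List (Int × Int)) × (List (Int × Int)) :=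
  let htm := pvHasTestsMap data
  let fuel := 1 + data.length + (fix_to_bic.map (fun p => p.2.length)).sum
  let events :=
    data.foldl
      (fun (evs : List (Bool × Int)) r =>
        (pvLoopE htm fix_to_bic fuel
          [((PySem.Dict.mk r).get? "bug_causer", 1, false)] (PySem.Set.empty, evs)).2)
      []
  let with_tests := pvCounter PySem.Dict.empty ((events.filter (fun e => e.1)).map (fun e => e.2))
  let without_tests := pvCounter PySem.Dict.empty ((events.filter (fun e => !e.1)).map (fun e => e.2))
  (with_tests.items, without_tests.items)

-- ===== PRECONDITION & SPEC =====
def Spec_aggregate_tests_vs_no_tests (data : List (List (String × String))) (fix_to_bic : List (String × List String)) (out : (List (Int × Int)) × (List (Int × Int))) : Prop := out = aggregate_tests_vs_no_tests_alt data fix_to_bic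
instance (data : List (List (String × String))) (fix_to_bic : List (String × List String)) (out : (List (Int × Int)) × (List (Int × Int))) : Decidable (Spec_aggregate_tests_vs_no_tests data fix_to_bic out) := by unfold Spec_aggregate_tests_vs_no_tests; infer_instance

-- ===== CLAIM (what is proved, stated in full; the proofs are below) =====
def Claim_equal_aggregate_tests_vs_no_tests : Prop := ∀ (data : List (List (String × String))) (fix_to_bic : List (String × List String)), Dom_aggregate_tests_vs_no_tests data fix_to_bic → Spec_aggregate_tests_vs_no_tests data fix_to_bic (aggregate_tests_vs_no_tests data fix_to_bic)

-- ===== LEMMAS AND PROOFS =====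

-- proof-side bridge: A's recursion with the dicts replaced by an event trace (same traversal)
def pvTraceRec (htm : PySem.Dict (Option String) Bool) (ftb : List (String × List String)) :
    Nat → Option String × Int × Bool → Nat × pvStE → Nat × pvStE
  | _, _, (0, st) => (0, st)
  | 0, _, (_+1, st) => (0, st)
  | n+1, (c, d, ht), (f+1, (vis, evs)) =>
    if PySem.Set.contains vis c then (f, (vis, evs))
    else
      let vis := PySem.Set.add vis c
      let ht := if htm.getD c false then true else ht
      (pvGetBics ftb c).foldl
        (fun p b => pvTraceRec htm ftb n (some b, d + 1, ht) p) (f, (vis, evs ++ [(ht, d)]))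

-- applying a trace to the two count dicts, event by event (what A's bumps amount to)
def pvApplyW (wt : PySem.Dict Int Int) (evs : List (Bool × Int)) : PySem.Dict Int Int :=
  evs.foldl (fun m e => if e.1 then m.modify e.2 0 (· + 1) else m) wt
def pvApplyO (wo : PySem.Dict Int Int) (evs : List (Bool × Int)) : PySem.Dict Int Int :=
  evs.foldl (fun m e => if e.1 then m else m.modify e.2 0 (· + 1)) wo

lemma pvApplyW_append (wt : PySem.Dict Int Int) (e1 e2 : List (Bool × Int)) :
    pvApplyW wt (e1 ++ e2) = pvApplyW (pvApplyW wt e1) e2 := List.foldl_append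
lemma pvApplyO_append (wo : PySem.Dict Int Int) (e1 e2 : List (Bool × Int)) :
    pvApplyO wo (e1 ++ e2) = pvApplyO (pvApplyO wo e1) e2 := List.foldl_append

-- applying a trace = counting the filtered depths (B's second stage)
lemma pvApplyW_counter : ∀ (evs : List (Bool × Int)) (m : PySem.Dict Int Int),
    pvApplyW m evs = pvCounter m ((evs.filter (fun e => e.1)).map (fun e => e.2)) := by
  intro evs
  induction evs with
  | nil => intro m; rfl
  | cons e evs ih =>
    intro m
    obtain ⟨f, d⟩ := e
    cases f <;> simp [pvApplyW, pvCounter, List.filter] at * <;> exact ih _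

lemma pvApplyO_counter : ∀ (evs : List (Bool × Int)) (m : PySem.Dict Int Int),
    pvApplyO m evs = pvCounter m ((evs.filter (fun e => !e.1)).map (fun e => e.2)) := by
  intro evs
  induction evs with
  | nil => intro m; rfl
  | cons e evs ih =>
    intro m
    obtain ⟨f, d⟩ := e
    cases f <;> simp [pvApplyO, pvCounter, List.filter] at * <;> exact ih _

-- an empty stack stops B's loop, whatever the fuel
lemma pvLoopE_nil (htm : PySem.Dict (Option String) Bool) (ftb : List (String × List String))
    (f : Nat) (st : pvStE) : pvLoopE htm ftb f [] st = st := by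
  cases f <;> rfl

-- the fuel returned by a call never exceeds the fuel given
lemma pv_foldl_fst_le {α β : Type} (g : Nat × α → β → Nat × α)
    (h : ∀ p b, (g p b).1 ≤ p.1) : ∀ (bs : List β) (p : Nat × α), (bs.foldl g p).1 ≤ p.1 := by
  intro bs
  induction bs with
  | nil => intro p; simp
  | cons b bs ih => intro p; exact le_trans (ih (g p b)) (h p b)

lemma pvTraceRec_fuel_le (htm : PySem.Dict (Option String) Bool) (ftb : List (String × List String)) :
    ∀ (n : Nat) (fr : Option String × Int × Bool) (p : Nat × pvStE),
      (pvTraceRec htm ftb n fr p).1 ≤ p.1 := by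
  intro n
  induction n with
  | zero =>
    intro fr p
    obtain ⟨fuel, st⟩ := p
    cases fuel <;> simp [pvTraceRec]
  | succ n ih =>
    intro fr p
    obtain ⟨c, d, ht⟩ := fr
    obtain ⟨fuel, vis, evs⟩ := p
    cases fuel with
    | zero => simp [pvTraceRec]
    | succ f =>
      simp only [pvTraceRec]
      split
      · simp
      · exact le_trans (pv_foldl_fst_le _ (fun p b => ih _ p) _ _) (Nat.le_succ f)

-- the trace recursion only APPENDS to the accumulated events
lemma pvTraceRec_acc (htm : PySem.Dict (Option String) Bool) (ftb : List (String × List String)) :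
    ∀ (n : Nat) (fr : Option String × Int × Bool) (f : Nat) (vis : PySem.Set (Option String))
      (evs0 evs : List (Bool × Int)),
      pvTraceRec htm ftb n fr (f, (vis, evs0 ++ evs)) =
        ((pvTraceRec htm ftb n fr (f, (vis, evs))).1,
         ((pvTraceRec htm ftb n fr (f, (vis, evs))).2.1,
          evs0 ++ (pvTraceRec htm ftb n fr (f, (vis, evs))).2.2)) := by
  intro n
  induction n with
  | zero =>
    intro fr f vis evs0 evs
    cases f <;> simp [pvTraceRec]
  | succ n ih =>
    have hfold : ∀ (bs : List String) (d : Int) (ht : Bool) (f : Nat)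
        (vis : PySem.Set (Option String)) (evs0 evs : List (Bool × Int)),
        bs.foldl (fun p b => pvTraceRec htm ftb n (some b, d, ht) p) (f, (vis, evs0 ++ evs)) =
          ((bs.foldl (fun p b => pvTraceRec htm ftb n (some b, d, ht) p) (f, (vis, evs))).1,
           ((bs.foldl (fun p b => pvTraceRec htm ftb n (some b, d, ht) p) (f, (vis, evs))).2.1,
            evs0 ++ (bs.foldl (fun p b => pvTraceRec htm ftb n (some b, d, ht) p) (f, (vis, evs))).2.2)) := by
      intro bs
      induction bs with
      | nil => intro d ht f vis evs0 evs; simp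
      | cons b bs ihb =>
        intro d ht f vis evs0 evs
        simp only [List.foldl_cons]
        rw [ih]
        exact ihb d ht _ _ evs0 _
    intro fr f vis evs0 evs
    obtain ⟨c, d, ht⟩ := fr
    cases f with
    | zero => simp [pvTraceRec]
    | succ f =>
      simp only [pvTraceRec]
      split
      · rfl
      · have := hfold (pvGetBics ftb c) (d + 1)
          (if htm.getD c false then true else ht) f (PySem.Set.add vis c) evs0
          (evs ++ [((if htm.getD c false then true else ht), d)])
        simpa using this
-- one pop of B's loop runs exactly one call of the trace recursion (fuel aligned call-for-pop)
lemma pv_stepE (htm : PySem.Dict (Option String) Bool) (ftb : List (String × List String)) :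
    ∀ (n fuel : Nat), fuel ≤ n →
      ∀ (c : Option String) (d : Int) (ht : Bool)
        (rest : List (Option String × Int × Bool)) (st : pvStE),
        pvLoopE htm ftb fuel ((c, d, ht) :: rest) st =
          pvLoopE htm ftb (pvTraceRec htm ftb n (c, d, ht) (fuel, st)).1 rest
            (pvTraceRec htm ftb n (c, d, ht) (fuel, st)).2 := by
  intro n
  induction n with
  | zero =>
    intro fuel h c d ht rest st
    interval_cases fuel
    cases rest <;> simp [pvTraceRec, pvLoopE]
  | succ n ih =>
    have hlist : ∀ (bs : List String) (fuel : Nat), fuel ≤ n → ∀ (d : Int) (ht : Bool)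
        (rest : List (Option String × Int × Bool)) (st : pvStE),
        pvLoopE htm ftb fuel ((bs.map (fun b => (some b, d, ht))) ++ rest) st =
          pvLoopE htm ftb (bs.foldl (fun p b => pvTraceRec htm ftb n (some b, d, ht) p) (fuel, st)).1
            rest (bs.foldl (fun p b => pvTraceRec htm ftb n (some b, d, ht) p) (fuel, st)).2 := by
      intro bs
      induction bs with
      | nil => intro fuel h d ht rest st; simp
      | cons b bs ihb =>
        intro fuel h d ht rest st
        simp only [List.map_cons, List.cons_append, List.foldl_cons]
        rw [ih fuel h]
        have := ihb (pvTraceRec htm ftb n (some b, d, ht) (fuel, st)).1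
          (le_trans (pvTraceRec_fuel_le htm ftb n _ _) h) d ht rest
          (pvTraceRec htm ftb n (some b, d, ht) (fuel, st)).2
        simpa using this
    intro fuel h c d ht rest st
    cases fuel with
    | zero => cases rest <;> simp [pvTraceRec, pvLoopE]
    | succ f =>
      obtain ⟨vis, evs⟩ := st
      simp only [pvTraceRec, pvLoopE]
      split
      · rfl
      · have hb : (ht || htm.getD c false) = (if htm.getD c false then true else ht) := by
          cases htm.getD c false <;> simp
        rw [hb]
        exact hlist (pvGetBics ftb c) f (Nat.succ_le_succ_iff.mp h) (d + 1) _ rest _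

-- fold version of pvTraceRec_acc: a prefix of the accumulator commutes through the child fold
lemma pvTraceFold_acc (htm : PySem.Dict (Option String) Bool) (ftb : List (String × List String))
    (n : Nat) (d : Int) (ht : Bool) :
    ∀ (bs : List String) (f : Nat) (vis : PySem.Set (Option String))
      (evs0 evs : List (Bool × Int)),
      bs.foldl (fun p b => pvTraceRec htm ftb n (some b, d, ht) p) (f, (vis, evs0 ++ evs)) =
        ((bs.foldl (fun p b => pvTraceRec htm ftb n (some b, d, ht) p) (f, (vis, evs))).1,
         ((bs.foldl (fun p b => pvTraceRec htm ftb n (some b, d, ht) p) (f, (vis, evs))).2.1,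
          evs0 ++ (bs.foldl (fun p b => pvTraceRec htm ftb n (some b, d, ht) p) (f, (vis, evs))).2.2)) := by
  intro bs
  induction bs with
  | nil => intro f vis evs0 evs; simp
  | cons b bs ihb =>
    intro f vis evs0 evs
    simp only [List.foldl_cons]
    rw [pvTraceRec_acc]
    exact ihb _ _ evs0 _

-- A's recursion is the trace recursion with the bumps applied to the incoming dicts
lemma pvRecCount_trace (htm : PySem.Dict (Option String) Bool) (ftb : List (String × List String)) :
    ∀ (n : Nat) (fr : Option String × Int × Bool) (f : Nat) (vis : PySem.Set (Option String))
      (wt wo : PySem.Dict Int Int),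
      pvRecCount htm ftb n fr (f, (vis, wt, wo)) =
        ((pvTraceRec htm ftb n fr (f, (vis, []))).1,
         ((pvTraceRec htm ftb n fr (f, (vis, []))).2.1,
          pvApplyW wt (pvTraceRec htm ftb n fr (f, (vis, []))).2.2,
          pvApplyO wo (pvTraceRec htm ftb n fr (f, (vis, []))).2.2)) := by
  intro n
  induction n with
  | zero =>
    intro fr f vis wt wo
    cases f <;> simp [pvRecCount, pvTraceRec, pvApplyW, pvApplyO]
  | succ n ih =>
    have hfold : ∀ (bs : List String) (d : Int) (ht : Bool) (f : Nat)
        (vis : PySem.Set (Option String)) (wt wo : PySem.Dict Int Int),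
        bs.foldl (fun p b => pvRecCount htm ftb n (some b, d, ht) p) (f, (vis, wt, wo)) =
          ((bs.foldl (fun p b => pvTraceRec htm ftb n (some b, d, ht) p) (f, (vis, []))).1,
           ((bs.foldl (fun p b => pvTraceRec htm ftb n (some b, d, ht) p) (f, (vis, []))).2.1,
            pvApplyW wt (bs.foldl (fun p b => pvTraceRec htm ftb n (some b, d, ht) p) (f, (vis, []))).2.2,
            pvApplyO wo (bs.foldl (fun p b => pvTraceRec htm ftb n (some b, d, ht) p) (f, (vis, []))).2.2)) := by
      intro bs
      induction bs with
      | nil => intro d ht f vis wt wo; simp [pvApplyW, pvApplyO]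
      | cons b bs ihb =>
        intro d ht f vis wt wo
        simp only [List.foldl_cons]
        rw [ih]
        rw [ihb]
        -- the tail fold of the trace starts from the head call's trace state
        have hshift := pvTraceFold_acc htm ftb n d ht bs
          (pvTraceRec htm ftb n (some b, d, ht) (f, (vis, []))).1
          (pvTraceRec htm ftb n (some b, d, ht) (f, (vis, []))).2.1
          (pvTraceRec htm ftb n (some b, d, ht) (f, (vis, []))).2.2 []
        simp only [List.append_nil] at hshift
        rw [hshift, pvApplyW_append, pvApplyO_append]
    intro fr f vis wt wo
    obtain ⟨c, d, ht⟩ := fr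
    cases f with
    | zero => simp [pvRecCount, pvTraceRec, pvApplyW, pvApplyO]
    | succ f =>
      simp only [pvRecCount, pvTraceRec]
      split
      · simp [pvApplyW, pvApplyO]
      · rw [hfold]
        have hsh := pvTraceFold_acc htm ftb n (d + 1)
          (if htm.getD c false then true else ht) (pvGetBics ftb c) f (PySem.Set.add vis c)
          [((if htm.getD c false then true else ht), d)] []
        simp only [List.append_nil, List.nil_append] at hsh ⊢
        rw [hsh, pvApplyW_append, pvApplyO_append]
        cases htm.getD c false <;> cases ht <;>
          simp [pvApplyW, pvApplyO]

-- ===== VERDICT (by name: the statement is the Claim_ definition above) =====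
theorem aggregate_tests_vs_no_tests_spec : Claim_equal_aggregate_tests_vs_no_tests := by
  intro data ftb _
  unfold Spec_aggregate_tests_vs_no_tests
  unfold aggregate_tests_vs_no_tests aggregate_tests_vs_no_tests_alt
  simp only []
  -- abbreviations local to this proof
  set htm := pvHasTestsMap data with hhtm
  set N := 1 + data.length + (ftb.map (fun p => p.2.length)).sum with hN
  -- B's event-collecting fold produces the concatenated traces
  have HB : ∀ (ds : List (List (String × String))) (evs : List (Bool × Int)),
      ds.foldl
        (fun (evs : List (Bool × Int)) r =>
          (pvLoopE htm ftb N
            [((PySem.Dict.mk r).get? "bug_causer", 1, false)] (PySem.Set.empty, evs)).2)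
        evs =
      evs ++ (ds.map (fun r =>
        (pvTraceRec htm ftb N ((PySem.Dict.mk r).get? "bug_causer", 1, false)
          (N, (PySem.Set.empty, []))).2.2)).flatten := by
    intro ds
    induction ds with
    | nil => intro evs; simp
    | cons r ds ih =>
      intro evs
      simp only [List.foldl_cons, List.map_cons, List.flatten_cons]
      rw [pv_stepE htm ftb N N le_rfl, pvLoopE_nil]
      have hacc := pvTraceRec_acc htm ftb N
        ((PySem.Dict.mk r).get? "bug_causer", 1, false) N PySem.Set.empty evs []
      simp only [List.append_nil] at hacc
      rw [hacc]
      simp only [ih]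
      rw [List.append_assoc]
  -- A's dict-threading fold applies the concatenated traces to the two dicts
  have HA : ∀ (ds : List (List (String × String))) (wt wo : PySem.Dict Int Int),
      ds.foldl
        (fun (acc : PySem.Dict Int Int × PySem.Dict Int Int) r =>
          let res := pvRecCount htm ftb N
                       ((PySem.Dict.mk r).get? "bug_causer", 1, false)
                       (N, (PySem.Set.empty, acc.1, acc.2))
          (res.2.2.1, res.2.2.2))
        (wt, wo) =
      (pvApplyW wt ((ds.map (fun r =>
          (pvTraceRec htm ftb N ((PySem.Dict.mk r).get? "bug_causer", 1, false)
            (N, (PySem.Set.empty, []))).2.2)).flatten),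
       pvApplyO wo ((ds.map (fun r =>
          (pvTraceRec htm ftb N ((PySem.Dict.mk r).get? "bug_causer", 1, false)
            (N, (PySem.Set.empty, []))).2.2)).flatten)) := by
    intro ds
    induction ds with
    | nil => intro wt wo; simp [pvApplyW, pvApplyO]
    | cons r ds ih =>
      intro wt wo
      simp only [List.foldl_cons, List.map_cons, List.flatten_cons]
      rw [pvRecCount_trace]
      simp only [ih]
      rw [pvApplyW_append, pvApplyO_append]
  rw [HA, HB]
  simp only [List.nil_append]
  rw [← pvApplyW_counter, ← pvApplyO_counter]
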